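-- pv_equiv track=rewrite | github.com/FingerTheDestroyer/Thumbs.NUk3 | core/utils/plugins.py | faded
-- ===== SOURCE A (Python) =====
-- def faded(text):
--     faded = ""
--     blue = 255
--     val = ( 255 // len(list(text))) - 5
--     for char in list(text):
--         faded += (f"\033[38;2;255;0;{blue}m{char}\033[0m")
--         if not blue == 0:
--             blue -= val
--             if blue < 0:
--                 blue = 0
--     return faded
-- ===== SOURCE B (Python) =====
-- def faded(text):
--     val = 255 // len(list(text)) - 5
--     return "".join(
--         f"\033[38;2;255;0;{max(255 - i * val, 0)}m{char}\033[0m"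
--         for i, char in enumerate(text)
--     )
-- ===== Notes on version B (the rewrite author's own statement) =====
-- stated objective: simpler
-- what changed: Replaces the running `blue` accumulator with its conditional decrement-and-clamp by a closed-form per-index channel max(255 - i*val, 0) inside a single joined comprehension over enumerate(text).
import Mathlib
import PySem

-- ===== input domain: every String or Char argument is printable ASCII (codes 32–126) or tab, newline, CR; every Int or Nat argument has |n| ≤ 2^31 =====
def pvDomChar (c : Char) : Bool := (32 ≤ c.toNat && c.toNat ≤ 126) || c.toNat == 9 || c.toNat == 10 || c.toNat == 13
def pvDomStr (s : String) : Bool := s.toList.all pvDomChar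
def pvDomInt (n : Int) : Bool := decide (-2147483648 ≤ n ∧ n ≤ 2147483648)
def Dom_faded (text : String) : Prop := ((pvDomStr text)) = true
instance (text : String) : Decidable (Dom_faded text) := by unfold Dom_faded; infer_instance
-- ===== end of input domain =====

-- B replaces A's running `blue` accumulator by the closed-form per-index channel
-- max(255 - i*val, 0) in a joined comprehension (objective: simpler).

-- ===== PORT A =====
-- the f-string piece  f"\033[38;2;255;0;{blue}m{char}\033[0m"
def fadedSegA (blue : Int) (ch : Char) : List Char :=
  "\x1b[38;2;255;0;".toList ++ PySem.Int.toChars blue ++ 'm' :: ch :: "\x1b[0m".toList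

-- one iteration of A's loop body (append the piece; conditionally decrement and clamp blue)
def fadedStep (val : Int) (st : List Char × Int) (ch : Char) : List Char × Int :=
  (st.1 ++ fadedSegA st.2 ch,
   if !(st.2 == 0) then
     (let b := st.2 - val
      if b < 0 then 0 else b)
   else st.2)

def faded (text : String) : String :=
  let val := PySem.Int.floordiv 255 ((text.toList.length : Int)) - 5
  String.ofList ((text.toList.foldl (fadedStep val) ([], 255)).1)

-- ===== PORT B =====
-- the f-string piece with the blue channel computed in closed form from the index
def fadedSegB (val : Int) (p : Int × Char) : List Char :=
  "\x1b[38;2;255;0;".toList ++ PySem.Int.toChars (max (255 - p.1 * val) 0) ++ 'm' :: p.2 :: "\x1b[0m".toList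

def faded_alt (text : String) : String :=
  let val := PySem.Int.floordiv 255 ((text.toList.length : Int)) - 5
  String.ofList (PySem.Chars.join [] ((PySem.List.enumerate text.toList 0).map (fadedSegB val)))

-- ===== PRECONDITION & SPEC =====
-- Pre_ excludes only the empty string, on which both A and B raise ZeroDivisionError (255 // 0).
def Pre_faded (text : String) : Prop := text.toList ≠ []
instance (text : String) : Decidable (Pre_faded text) := by unfold Pre_faded; infer_instance
def pvWitness_faded : String := ("ab")

def Spec_faded (text : String) (out : String) : Prop := out = faded_alt text
instance (text : String) (out : String) : Decidable (Spec_faded text out) := by unfold Spec_faded; infer_instance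

-- ===== CLAIM (what is proved, stated in full; the proofs are below) =====
def Claim_equal_faded : Prop := ∀ (text : String), Dom_faded text → Pre_faded text → Spec_faded text (faded text)

-- ===== LEMMAS AND PROOFS =====

-- "".join distributes over cons
lemma join_empty_cons (x : List Char) (l : List (List Char)) :
    PySem.Chars.join [] (x :: l) = x ++ PySem.Chars.join [] l := by
  match l with
  | [] => simp [PySem.Chars.join_singleton, PySem.Chars.join_nil]
  | y :: l' => rw [PySem.Chars.join_cons_cons]; simp

-- A's conditional decrement-and-clamp step, applied to the closed form at index i,
-- yields the closed form at index i+1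
lemma blue_step (val i : Int) (hi : 0 ≤ i) :
    (if !(max (255 - i * val) 0 == 0) then
       (let b := max (255 - i * val) 0 - val
        if b < 0 then 0 else b)
     else max (255 - i * val) 0) = max (255 - (i + 1) * val) 0 := by
  rcases le_or_gt (255 - i * val) 0 with h | h
  · -- clamped at 0 already; then val > 0 and it stays ≤ 0
    have hv : 0 < val := by
      by_contra hv
      have : i * val ≤ 0 := mul_nonpos_of_nonneg_of_nonpos hi (by omega)
      omega
    have h' : 255 - (i + 1) * val ≤ 0 := by nlinarith
    simp [max_eq_right h, max_eq_right h']
  · -- still positive: plain decrement, clamped if it crosses 0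
    have hm : max (255 - i * val) 0 = 255 - i * val := max_eq_left (by omega)
    rw [hm]
    have harith : 255 - i * val - val = 255 - (i + 1) * val := by ring
    simp only [harith]
    split_ifs with h0 h1 <;> simp_all [max_def] <;> omega

-- the two f-string pieces coincide when A's blue equals B's closed form
lemma seg_eq (val i : Int) (ch : Char) :
    fadedSegA (max (255 - i * val) 0) ch = fadedSegB val (i, ch) := rfl

-- loop invariant: starting A's fold at index i with blue = max(255 - i*val, 0)
-- produces exactly B's joined pieces for enumerate cs i
lemma loop_inv (val : Int) : ∀ (cs : List Char) (i : Int), 0 ≤ i → ∀ (acc : List Char),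
    (cs.foldl (fadedStep val) (acc, max (255 - i * val) 0)).1
      = acc ++ PySem.Chars.join [] ((PySem.List.enumerate cs i).map (fadedSegB val)) := by
  intro cs
  induction cs with
  | nil => intro i hi acc; simp [PySem.List.enumerate_nil, PySem.Chars.join_nil]
  | cons c cs ih =>
    intro i hi acc
    rw [List.foldl_cons]
    have hstep : fadedStep val (acc, max (255 - i * val) 0) c
        = (acc ++ fadedSegB val (i, c), max (255 - (i + 1) * val) 0) := by
      rw [fadedStep, blue_step val i hi, seg_eq]
    rw [hstep, ih (i + 1) (by omega), PySem.List.enumerate_cons, List.map_cons,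
        join_empty_cons, List.append_assoc]

-- ===== VERDICT (by name: the statement is the Claim_ definition above) =====
theorem faded_spec : Claim_equal_faded := by
  intro text _ _
  unfold Spec_faded faded faded_alt
  have h := loop_inv (PySem.Int.floordiv 255 ((text.toList.length : Int)) - 5)
    text.toList 0 le_rfl []
  simp at h ⊢
  rw [h]
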